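-- pv_equiv track=rewrite | github.com/raghvendraacharya95/live_auction_web_server | web_socket/new_bid.py | get_list_live_user_items
-- ===== SOURCE A (Python) =====
-- def get_list_live_user_items(all_auction_dict):
-- 	user_items_list = []
-- 	user_item_dict = {}
-- 	for item in all_auction_dict["live_auction"]:
-- 		auction_id,user_id,status,item_id=item
-- 		# users_item= str(user_id)+"|"+str(item_id)
-- 		if str(item_id) not in user_item_dict:
-- 			user_item_dict.update({str(item_id):[user_id]})
-- 		else:
-- 			user_item_dict[str(item_id)].append(user_id)
-- 		# user_items_list.append(users_item)
-- 	return user_item_dict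
-- ===== SOURCE B (Python) =====
-- def get_list_live_user_items(all_auction_dict):
--     items = all_auction_dict["live_auction"]
--     result = {}
--     while items:
--         key = str(items[0][3])
--         result[key] = [it[1] for it in items if str(it[3]) == key]
--         items = [it for it in items if str(it[3]) != key]
--     return result
-- ===== Notes on version B (the rewrite author's own statement) =====
-- stated objective: alternative
-- what changed: Replaces A's one-pass insert-or-append dict loop with an extract-group loop: repeatedly take the first remaining item's str(item_id), collect all its user_ids in one comprehension, and drop that whole group from the worklist until it is empty.
import Mathlib
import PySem

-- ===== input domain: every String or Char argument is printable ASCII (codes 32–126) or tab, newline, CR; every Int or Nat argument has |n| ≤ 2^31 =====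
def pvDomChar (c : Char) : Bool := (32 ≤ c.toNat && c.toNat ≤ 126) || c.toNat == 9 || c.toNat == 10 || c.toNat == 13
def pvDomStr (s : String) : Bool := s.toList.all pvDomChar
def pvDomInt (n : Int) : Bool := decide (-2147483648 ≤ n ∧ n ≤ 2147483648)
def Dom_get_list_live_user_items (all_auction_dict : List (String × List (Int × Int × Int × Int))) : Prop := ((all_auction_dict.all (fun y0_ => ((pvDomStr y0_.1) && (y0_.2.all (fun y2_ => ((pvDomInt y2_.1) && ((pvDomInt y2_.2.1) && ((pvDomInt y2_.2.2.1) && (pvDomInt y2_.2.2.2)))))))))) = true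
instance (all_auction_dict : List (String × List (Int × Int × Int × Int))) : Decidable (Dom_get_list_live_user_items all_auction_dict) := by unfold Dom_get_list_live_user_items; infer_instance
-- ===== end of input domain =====

-- B replaces A's one-pass insert-or-append dict loop by an extract-group worklist loop:
-- take the first remaining item's key, collect its whole group, drop it, repeat (alternative decomposition).

-- ===== PORT A =====
def get_list_live_user_items (all_auction_dict : List (String × List (Int × Int × Int × Int))) : List (String × List Int) :=
  match (PySem.Dict.mk all_auction_dict).get? "live_auction" with
  | none => []   -- Python raises KeyError here; excluded by Pre_
  | some items =>
    (items.foldl (fun d it =>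
        if (d.contains (PySem.Int.toStr it.2.2.2)) = false then
          d.insert (PySem.Int.toStr it.2.2.2) [it.2.1]
        else
          d.modify (PySem.Int.toStr it.2.2.2) [] (fun l => l ++ [it.2.1]))
      PySem.Dict.empty).items

-- ===== PORT B =====
-- B's while-loop over the shrinking worklist; `result[key] = …` always adds a NEW key
-- (every earlier key was filtered out of the worklist), so it is ported as appending the pair.
def pvExtractLoop (items : List (Int × Int × Int × Int)) (result : List (String × List Int)) : List (String × List Int) :=
  match items with
  | [] => result
  | it :: rest =>
    -- key = str(items[0][3]) inlined at its two uses
    pvExtractLoop ((it :: rest).filter (fun x => !(PySem.Int.toStr x.2.2.2 == PySem.Int.toStr it.2.2.2)))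
      (result ++ [(PySem.Int.toStr it.2.2.2,
        ((it :: rest).filter (fun x => PySem.Int.toStr x.2.2.2 == PySem.Int.toStr it.2.2.2)).map (fun x => x.2.1))])
termination_by items.length
decreasing_by
  simp only [List.filter_cons, beq_self_eq_true, Bool.not_true, Bool.false_eq_true, if_false]
  exact Nat.lt_succ_of_le (List.length_filter_le _ _)

def get_list_live_user_items_alt (all_auction_dict : List (String × List (Int × Int × Int × Int))) : List (String × List Int) :=
  match (PySem.Dict.mk all_auction_dict).get? "live_auction" with
  | none => []   -- Python raises KeyError here; excluded by Pre_
  | some items => pvExtractLoop items []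

-- ===== PRECONDITION & SPEC =====
-- Pre_ excludes exactly the inputs without a "live_auction" key, on which Python A (and B) raise KeyError.
def Pre_get_list_live_user_items (all_auction_dict : List (String × List (Int × Int × Int × Int))) : Prop :=
  "live_auction" ∈ all_auction_dict.map Prod.fst
instance (all_auction_dict : List (String × List (Int × Int × Int × Int))) : Decidable (Pre_get_list_live_user_items all_auction_dict) := by unfold Pre_get_list_live_user_items; infer_instance
def pvWitness_get_list_live_user_items : (List (String × List (Int × Int × Int × Int))) :=
  [("live_auction", [(1, 10, 0, 5), (2, 11, 0, 5), (3, 12, 0, 7)])]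

def Spec_get_list_live_user_items (all_auction_dict : List (String × List (Int × Int × Int × Int))) (out : List (String × List Int)) : Prop := out = get_list_live_user_items_alt all_auction_dict
instance (all_auction_dict : List (String × List (Int × Int × Int × Int))) (out : List (String × List Int)) : Decidable (Spec_get_list_live_user_items all_auction_dict out) := by unfold Spec_get_list_live_user_items; infer_instance

-- ===== CLAIM (what is proved, stated in full; the proofs are below) =====
def Claim_equal_get_list_live_user_items : Prop := ∀ (all_auction_dict : List (String × List (Int × Int × Int × Int))), Dom_get_list_live_user_items all_auction_dict → Pre_get_list_live_user_items all_auction_dict → Spec_get_list_live_user_items all_auction_dict (get_list_live_user_items all_auction_dict)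

-- ===== LEMMAS AND PROOFS =====

-- A's loop body equals a plain `d[k] = d.get(k, []) + [v]` modify step.
theorem pv_step_eq (d : PySem.Dict String (List Int)) (k : String) (v : Int) :
    (if d.contains k = false then d.insert k [v] else d.modify k [] (fun l => l ++ [v]))
      = d.modify k [] (fun l => l ++ [v]) := by
  by_cases h : d.contains k = false
  · have h2 : d.get? k = none := (PySem.Dict.get?_eq_none_iff_contains d k).mpr h
    simp [h, PySem.Dict.insert, PySem.Dict.modify, PySem.Dict.getD, h2]
  · simp [h]

-- A's grouping loop, characterised: its items are the dedup-keys / filter-per-key map.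
theorem pv_group_eq (items : List (Int × Int × Int × Int)) :
    (items.foldl (fun d it =>
        if (d.contains (PySem.Int.toStr it.2.2.2)) = false then
          d.insert (PySem.Int.toStr it.2.2.2) [it.2.1]
        else
          d.modify (PySem.Int.toStr it.2.2.2) [] (fun l => l ++ [it.2.1]))
      PySem.Dict.empty).items
    = (PySem.List.dedup (items.map (fun it => PySem.Int.toStr it.2.2.2))).map
        (fun k => (k, (items.filter (fun it => PySem.Int.toStr it.2.2.2 == k)).map (fun it => it.2.1))) := by
  simp only [pv_step_eq]
  suffices h : ((items.map (fun it : Int × Int × Int × Int => (PySem.Int.toStr it.2.2.2, it.2.1))).foldl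
      (fun (d : PySem.Dict String (List Int)) (p : String × Int) => d.modify p.1 [] (fun l => l ++ [p.2])) PySem.Dict.empty).items
      = (PySem.List.dedup (items.map (fun it => PySem.Int.toStr it.2.2.2))).map
          (fun k => (k, (items.filter (fun it => PySem.Int.toStr it.2.2.2 == k)).map (fun it => it.2.1))) by
    simpa [List.foldl_map] using h
  have hnd : ((items.map (fun it : Int × Int × Int × Int => (PySem.Int.toStr it.2.2.2, it.2.1))).foldl
      (fun (d : PySem.Dict String (List Int)) (p : String × Int) => d.modify p.1 [] (fun l => l ++ [p.2])) PySem.Dict.empty).keys.Nodup := by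
    exact PySem.Dict.nodup_keys_foldl_modify_key _ (fun p : String × Int => p.1) [] (fun _ p l => l ++ [p.2]) _
      (by simp [PySem.Dict.keys_empty])
  rw [PySem.Dict.items_eq_map_keys _ hnd []]
  have hkeys : ((items.map (fun it : Int × Int × Int × Int => (PySem.Int.toStr it.2.2.2, it.2.1))).foldl
      (fun (d : PySem.Dict String (List Int)) (p : String × Int) => d.modify p.1 [] (fun l => l ++ [p.2])) PySem.Dict.empty).keys
      = PySem.List.dedup (items.map (fun it => PySem.Int.toStr it.2.2.2)) := by
    rw [PySem.Dict.keys_foldl_modify_key]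
    simp [PySem.Set.update, PySem.Set.ofList_eq_foldl, PySem.Dict.keys_empty,
      List.map_map, Function.comp_def]
  rw [hkeys]
  apply List.map_congr_left
  intro k _
  rw [PySem.Dict.getD_foldl_modify_append]
  simp [PySem.Dict.getD_empty, List.filter_map, Function.comp_def, List.map_map]

-- Set.add keeps existing members.
theorem pv_mem_add {α : Type} [BEq α] [LawfulBEq α] (s : List α) (x y : α) (h : x ∈ s) :
    x ∈ PySem.Set.add s y := by
  simp [PySem.Set.add]; split <;> simp [h]

-- Folding Set.add over a list skips elements already in the accumulator.
theorem pv_foldl_add_filter {α : Type} [BEq α] [LawfulBEq α] [DecidableEq α]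
    (x : α) (xs : List α) :
    ∀ s : List α, x ∈ s →
      xs.foldl PySem.Set.add s = (xs.filter (fun y => y ≠ x)).foldl PySem.Set.add s := by
  induction xs with
  | nil => intro s _; simp
  | cons y ys ih =>
    intro s hx
    by_cases hyx : y = x
    · subst hyx
      have : PySem.Set.add s y = s := by
        simp [PySem.Set.add, PySem.Set.contains, hx]
      simp [this, ih s hx]
    · simp only [List.foldl_cons, List.filter_cons, decide_eq_true_eq]
      rw [if_pos hyx]
      exact ih _ (pv_mem_add s x y hx)

-- Folding Set.add below a head not occurring later commutes with cons.
theorem pv_foldl_add_cons {α : Type} [BEq α] [LawfulBEq α]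
    (x : α) (l : List α) (hx : x ∉ l) :
    ∀ s : List α, l.foldl PySem.Set.add (x :: s) = x :: l.foldl PySem.Set.add s := by
  induction l with
  | nil => intro s; simp
  | cons y ys ih =>
    intro s
    have hyx : y ≠ x := fun h => hx (h ▸ List.mem_cons_self)
    have hx' : x ∉ ys := fun h => hx (List.mem_cons_of_mem _ h)
    have hadd : PySem.Set.add (x :: s) y = x :: PySem.Set.add s y := by
      simp [PySem.Set.add, PySem.Set.contains, List.elem_cons]
      have : (y == x) = false := by simpa using hyx
      simp [this]
      split <;> simp
    simp only [List.foldl_cons, hadd]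
    exact (ih hx') _

-- dedup of a cons: head, then dedup of the tail with the head's value removed.
theorem pv_dedup_cons {α : Type} [BEq α] [LawfulBEq α] [DecidableEq α] (x : α) (xs : List α) :
    PySem.List.dedup (x :: xs) = x :: PySem.List.dedup (xs.filter (fun y => y ≠ x)) := by
  have h1 : PySem.List.dedup (x :: xs) = xs.foldl PySem.Set.add [x] := by
    simp [PySem.List.dedup_eq_ofList, PySem.Set.ofList_eq_foldl, PySem.Set.add, PySem.Set.contains]
  rw [h1, pv_foldl_add_filter x xs [x] (by simp),
      pv_foldl_add_cons x _ (by simp) []]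
  simp [PySem.List.dedup_eq_ofList, PySem.Set.ofList_eq_foldl]

-- Filtering for a key other than the extracted one commutes with dropping the extracted group.
theorem pv_filter_shrink (k k0 : String) (hk : k ≠ k0) (l : List (Int × Int × Int × Int)) :
    (l.filter (fun x => !(PySem.Int.toStr x.2.2.2 == k0))).filter (fun x => PySem.Int.toStr x.2.2.2 == k)
      = l.filter (fun x => PySem.Int.toStr x.2.2.2 == k) := by
  induction l with
  | nil => rfl
  | cons a l ih =>
    by_cases h2 : PySem.Int.toStr a.2.2.2 = k0
    · have h : (PySem.Int.toStr a.2.2.2 == k) = false := by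
        rw [h2]
        exact beq_eq_false_iff_ne.mpr (Ne.symm hk)
      have hk0 : (k0 == k) = false := beq_eq_false_iff_ne.mpr (Ne.symm hk)
      simp only [List.filter_cons, h2, beq_self_eq_true, Bool.not_true, Bool.false_eq_true,
        if_false, hk0, ih]
    · have hne : (PySem.Int.toStr a.2.2.2 == k0) = false := beq_eq_false_iff_ne.mpr h2
      by_cases h : PySem.Int.toStr a.2.2.2 = k
      · have hyes : (PySem.Int.toStr a.2.2.2 == k) = true := beq_iff_eq.mpr h
        simp only [List.filter_cons, hne, Bool.not_false, if_true, hyes, ih]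
      · have hno : (PySem.Int.toStr a.2.2.2 == k) = false := beq_eq_false_iff_ne.mpr h
        simp only [List.filter_cons, hne, Bool.not_false, if_true, hno, Bool.false_eq_true,
          if_false, ih]

-- B's extract-group loop computes the dedup-keys / filter-per-key map (appended to the accumulator).
theorem pv_loop_eq (items : List (Int × Int × Int × Int)) (result : List (String × List Int)) :
    pvExtractLoop items result
      = result ++ (PySem.List.dedup (items.map (fun it => PySem.Int.toStr it.2.2.2))).map
          (fun k => (k, (items.filter (fun it => PySem.Int.toStr it.2.2.2 == k)).map (fun it => it.2.1))) := by
  induction items, result using pvExtractLoop.induct with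
  | case1 result => simp [pvExtractLoop]
  | case2 result it t ih =>
    rw [pvExtractLoop, ih]
    have hded : PySem.List.dedup ((it :: t).map (fun x => PySem.Int.toStr x.2.2.2))
        = PySem.Int.toStr it.2.2.2 :: PySem.List.dedup
            (((it :: t).filter (fun x => !(PySem.Int.toStr x.2.2.2 == PySem.Int.toStr it.2.2.2))).map
              (fun x => PySem.Int.toStr x.2.2.2)) := by
      have h1 : (it :: t).filter (fun x => !(PySem.Int.toStr x.2.2.2 == PySem.Int.toStr it.2.2.2))
          = t.filter (fun x => !(PySem.Int.toStr x.2.2.2 == PySem.Int.toStr it.2.2.2)) := by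
        simp
      have h2 : t.filter ((fun y => decide (y ≠ PySem.Int.toStr it.2.2.2)) ∘ (fun x : Int × Int × Int × Int => PySem.Int.toStr x.2.2.2))
          = t.filter (fun x => !(PySem.Int.toStr x.2.2.2 == PySem.Int.toStr it.2.2.2)) := by
        apply List.filter_congr
        intro a _
        by_cases hc : PySem.Int.toStr a.2.2.2 = PySem.Int.toStr it.2.2.2
        · simp [hc]
        · simp [Function.comp_apply, hc, beq_eq_false_iff_ne.mpr hc]
      rw [h1, List.map_cons, pv_dedup_cons, List.filter_map, h2]
    rw [hded, List.map_cons]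
    simp only [List.append_assoc, List.singleton_append]
    congr 2
    apply List.map_congr_left
    intro k hk
    have hkne : k ≠ PySem.Int.toStr it.2.2.2 := by
      obtain ⟨x, hx, hxk⟩ := List.mem_map.mp ((PySem.List.mem_dedup _ _).mp hk)
      have hxf := List.of_mem_filter hx
      simp only [Bool.not_eq_true', beq_eq_false_iff_ne, ne_eq] at hxf
      exact hxk ▸ hxf
    rw [pv_filter_shrink k (PySem.Int.toStr it.2.2.2) hkne]

theorem get_list_live_user_items_spec : Claim_equal_get_list_live_user_items := by
  intro all _ hpre
  unfold Spec_get_list_live_user_items get_list_live_user_items get_list_live_user_items_alt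
  cases hg : (PySem.Dict.mk all).get? "live_auction" with
  | none =>
    exfalso
    have := (PySem.Dict.get?_eq_none_iff_not_mem_keys (PySem.Dict.mk all) "live_auction").mp hg
    have hp : "live_auction" ∈ all.map Prod.fst := hpre
    exact this (by simpa [PySem.Dict.keys_mk] using hp)
  | some items =>
    dsimp only
    rw [pv_group_eq items, pv_loop_eq items []]
    simp
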